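-- pv_equiv track=rewrite | github.com/mukerem/WebScrapping | codeforces/archive/Multi_core_Processor_411B.py | deadlock_situation
-- ===== SOURCE A (Python) =====
-- from typing import List
--
-- def deadlock_situation(n: int, m: int, k: int, L: List[List[int]]) -> List[int]:
--     blockedCell = [False] * (k+1)
--     blockedCore = [0] * n
--     for i in range(m):
--         cells = {}
--         for j in range(n):
--             if blockedCore[j] != 0:
--                 continue
--             cell = L[j][i]
--             if cell == 0:
--                 continue
--             if blockedCell[cell] == True:
--                 blockedCore[j] = i + 1
--             elif cell in cells:
--                 #blockedCell[cell] = True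
--                 cells[cell].append(j)
--             else:
--                 cells[cell] = [j]
--         for cell in cells:
--             cores = cells[cell]
--             if len(cores) > 1:
--                 blockedCell[cell] = True
--                 for core in cores:
--                     blockedCore[core] = i + 1
--     return blockedCore
-- ===== SOURCE B (Python) =====
-- from typing import List
--
-- def deadlock_situation(n: int, m: int, k: int, L: List[List[int]]) -> List[int]:
--     locked = set()
--     res = [0] * n
--     for i in range(m):
--         prev = res
--
--         def clash(j):
--             return any(h != j and prev[h] == 0 and L[h][i] == L[j][i]
--                        for h in range(n))
--
--         res = [i + 1 if prev[j] == 0 and L[j][i] != 0 and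
--                (L[j][i] in locked or clash(j)) else prev[j]
--                for j in range(n)]
--         locked |= {L[j][i] for j in range(n)
--                    if prev[j] == 0 and L[j][i] != 0 and clash(j)}
--     return res
-- ===== Notes on version B (the rewrite author's own statement) =====
-- stated objective: alternative
-- what changed: A groups active cores per column in a dict of cell->core-lists and resolves conflicts by walking the dict; B builds no grouping structure at all: each active core decides by a direct pairwise scan for another active core reading the same cell, and locked cells are a set of cell values rebuilt by union each column instead of A's boolean array indexed (and aliased) by cell.
-- outside the precondition, e.g. on deadlock_situation(3, 2, 2, [[2, 0], [2, 0], [0, -1]]): A returns [1, 1, 2], B returns [1, 1, 0]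
import Mathlib
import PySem

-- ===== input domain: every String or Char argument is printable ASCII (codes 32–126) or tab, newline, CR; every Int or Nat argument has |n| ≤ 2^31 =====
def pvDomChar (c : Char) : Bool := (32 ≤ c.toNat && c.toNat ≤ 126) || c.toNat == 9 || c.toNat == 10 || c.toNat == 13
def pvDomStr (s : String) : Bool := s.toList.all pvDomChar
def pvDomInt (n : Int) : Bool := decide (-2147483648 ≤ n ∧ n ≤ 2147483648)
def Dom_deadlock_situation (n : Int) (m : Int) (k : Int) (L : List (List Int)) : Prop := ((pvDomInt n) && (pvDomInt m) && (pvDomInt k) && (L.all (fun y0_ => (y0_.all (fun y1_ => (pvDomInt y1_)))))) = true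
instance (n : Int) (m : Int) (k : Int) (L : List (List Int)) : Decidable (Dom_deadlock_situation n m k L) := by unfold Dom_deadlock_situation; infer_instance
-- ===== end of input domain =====

-- B drops A's per-column dict-of-core-lists entirely: each active core decides its fate by a
-- direct pairwise scan for another active core on the same cell, and locked cells are kept as a
-- set of cell VALUES rebuilt by union per column (alternative algorithm, O(n^2*m) vs O(n*m)).
-- Equivalence of RETURN values is proved on Pre_ (cells in their natural range 0..k).

-- ===== PORT A =====
def deadlock_situation (n : Int) (m : Int) (k : Int) (L : List (List Int)) : List Int :=
  let blockedCell : List Bool := List.replicate (k + 1).toNat false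
  let blockedCore : List Int := List.replicate n.toNat 0
  let res := (PySem.List.pyRange 0 m 1).foldl (fun (st : List Bool × List Int) i =>
    let inner := (PySem.List.pyRange 0 n 1).foldl
      (fun (st2 : PySem.Dict Int (List Int) × List Int) j =>
        if PySem.List.pyGetD st2.2 j 0 ≠ 0 then st2
        else
          let cell := PySem.List.pyGetD (PySem.List.pyGetD L j []) i 0
          if cell = 0 then st2
          else if PySem.List.pyGetD st.1 cell false = true then
            (st2.1, PySem.List.pySetD st2.2 j (i + 1))
          else if st2.1.contains cell then
            (st2.1.modify cell [] (· ++ [j]), st2.2)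
          else
            (st2.1.insert cell [j], st2.2))
      (PySem.Dict.empty, st.2)
    let cells := inner.1
    cells.keys.foldl (fun (st3 : List Bool × List Int) cell =>
      let cores := cells.getD cell []
      if cores.length > 1 then
        (PySem.List.pySetD st3.1 cell true,
         cores.foldl (fun bc core => PySem.List.pySetD bc core (i + 1)) st3.2)
      else st3)
      (st.1, inner.2))
    (blockedCell, blockedCore)
  res.2

-- ===== PORT B =====
def deadlock_situation_alt (n : Int) (m : Int) (k : Int) (L : List (List Int)) : List Int :=
  let res := (PySem.List.pyRange 0 m 1).foldl (fun (st : PySem.Set Int × List Int) i =>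
    let locked := st.1
    let prev := st.2
    -- clash(j): any other still-active core reads the same cell this column
    let clash : Int → Bool := fun j =>
      (PySem.List.pyRange 0 n 1).any (fun h =>
        decide (¬ h = j) && decide (PySem.List.pyGetD prev h 0 = 0) &&
        decide (PySem.List.pyGetD (PySem.List.pyGetD L h []) i 0
                  = PySem.List.pyGetD (PySem.List.pyGetD L j []) i 0))
    let res' := (PySem.List.pyRange 0 n 1).map (fun j =>
      if PySem.List.pyGetD prev j 0 = 0 ∧
         PySem.List.pyGetD (PySem.List.pyGetD L j []) i 0 ≠ 0 ∧
         (PySem.Set.contains locked (PySem.List.pyGetD (PySem.List.pyGetD L j []) i 0) = true ∨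
          clash j = true)
      then i + 1 else PySem.List.pyGetD prev j 0)
    let locked' := PySem.Set.union locked (PySem.Set.ofList
      (((PySem.List.pyRange 0 n 1).filter (fun j =>
          decide (PySem.List.pyGetD prev j 0 = 0) &&
          decide (PySem.List.pyGetD (PySem.List.pyGetD L j []) i 0 ≠ 0) && clash j)).map
        (fun j => PySem.List.pyGetD (PySem.List.pyGetD L j []) i 0)))
    (locked', res'))
    ((PySem.Set.empty : PySem.Set Int), List.replicate n.toNat 0)
  res.2

-- ===== PRECONDITION & SPEC =====
-- Pre_ is the natural domain of the problem: the first n rows exist, each has at least m entries,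
-- and every cell in the first m columns is 0 or a cell number 1..k (as in the original problem
-- statement). Outside it A raises IndexError, with two exceptions on which A still returns:
-- (a) negative cells in -(k+1)..-1, which A accepts only through Python's negative-index
-- wraparound into blockedCell (an aliasing artefact B's value-set of cells has no reason to
-- mimic), and (b) out-of-range cells read only in rows of cores that are already blocked.
def Pre_deadlock_situation (n : Int) (m : Int) (k : Int) (L : List (List Int)) : Prop :=
  0 < m → 0 < n →
  n ≤ (L.length : Int) ∧
  ∀ row ∈ L.take n.toNat, m ≤ (row.length : Int) ∧
    ∀ c ∈ row.take m.toNat, c = 0 ∨ (0 < c ∧ c ≤ k)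
instance (n : Int) (m : Int) (k : Int) (L : List (List Int)) : Decidable (Pre_deadlock_situation n m k L) := by unfold Pre_deadlock_situation; infer_instance

def pvWitness_deadlock_situation : Int × Int × Int × List (List Int) :=
  (3, 2, 1, [[1, 0], [1, 0], [0, 1]])

def Spec_deadlock_situation (n : Int) (m : Int) (k : Int) (L : List (List Int)) (out : List Int) : Prop := out = deadlock_situation_alt n m k L
instance (n : Int) (m : Int) (k : Int) (L : List (List Int)) (out : List Int) : Decidable (Spec_deadlock_situation n m k L out) := by unfold Spec_deadlock_situation; infer_instance

-- ===== CLAIM (what is proved, stated in full; the proofs are below) =====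
def Claim_equal_deadlock_situation : Prop := ∀ (n : Int) (m : Int) (k : Int) (L : List (List Int)), Dom_deadlock_situation n m k L → Pre_deadlock_situation n m k L → Spec_deadlock_situation n m k L (deadlock_situation n m k L)

-- ===== LEMMAS AND PROOFS =====

lemma dl_pySetD_true_self {b : List Bool} {c : Int}
    (h : PySem.List.pyGetD b c false = true) :
    PySem.List.pySetD b c true = b := by
  unfold PySem.List.pyGetD PySem.List.pyGet? at h
  unfold PySem.List.pySetD PySem.List.pySet?
  cases hk : PySem.List.pyIdx? b.length c with
  | none => simp
  | some t =>
    rw [hk] at h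
    simp only [Option.bind] at h
    cases hbt : b[t]? with
    | none => simp [hbt] at h
    | some x =>
      rw [hbt] at h
      simp only [Option.getD_some] at h
      subst h
      have ht := (List.getElem?_eq_some_iff.mp hbt).1
      have hx : b[t] = true := by
        have h2 := List.getElem?_eq_getElem ht
        rw [h2] at hbt; exact (Option.some.inj hbt)
      simp only [Option.map_some, Option.getD_some]
      rw [← hx]
      exact List.set_getElem_self ht

lemma dl_pyGetD_pySetD_true {b : List Bool} {c c' : Int}
    (h : PySem.List.pyGetD b c' false = true) :
    PySem.List.pyGetD (PySem.List.pySetD b c true) c' false = true := by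
  unfold PySem.List.pyGetD PySem.List.pyGet? at h ⊢
  unfold PySem.List.pySetD PySem.List.pySet?
  cases hk : PySem.List.pyIdx? b.length c with
  | none => simpa using h
  | some t =>
    simp only [Option.map_some, Option.getD_some]
    have hl : (b.set t true).length = b.length := List.length_set ..
    rw [hl]
    cases hk' : PySem.List.pyIdx? b.length c' with
    | none => rw [hk'] at h; simp at h
    | some t' =>
      rw [hk'] at h
      simp only [Option.bind] at h ⊢
      rw [List.getElem?_set]
      by_cases he : t = t'
      · subst he
        cases hbt : b[t]? with
        | none => rw [hbt] at h; simp at h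
        | some x =>
          have ht := (List.getElem?_eq_some_iff.mp hbt).1
          simp [ht]
      · simp [he]; exact h

lemma dl_foldl_set_length {α : Type} (w : α) :
    ∀ (js : List Nat) (xs : List α),
      (js.foldl (fun a j => a.set j w) xs).length = xs.length := by
  intro js
  induction js with
  | nil => intro xs; rfl
  | cons j js ih => intro xs; simpa [List.foldl_cons] using (ih (xs.set j w)).trans (List.length_set ..)

lemma dl_foldl_set_getElem? {α : Type} (w : α) :
    ∀ (js : List Nat) (xs : List α) (t : Nat),
      (js.foldl (fun a j => a.set j w) xs)[t]? =
        if t ∈ js ∧ t < xs.length then some w else xs[t]? := by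
  intro js
  induction js with
  | nil => intro xs t; simp
  | cons j js ih =>
    intro xs t
    rw [List.foldl_cons, ih (xs.set j w) t, List.length_set]
    by_cases hm : t ∈ js ∧ t < xs.length
    · simp [hm, List.mem_cons]
    · rw [if_neg hm]
      rw [List.getElem?_set]
      by_cases hj : j = t
      · subst hj
        by_cases hl : j < xs.length
        · simp [hl, List.mem_cons]
        · simp [hl, List.mem_cons]
      · simp [hj, List.mem_cons]
        intro hc
        rcases hc with hc | hc
        · exact absurd hc.symm hj
        · exact fun hlt => absurd ⟨hc, hlt⟩ hm

lemma dl_setTrue_drop (q : Int → Bool) :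
    ∀ (l : List Int) (b : List Bool),
      (∀ c ∈ l, q c = true → PySem.List.pyGetD b c false = true) →
      l.foldl (fun x c => PySem.List.pySetD x c true) b
        = (l.filter (fun c => !q c)).foldl (fun x c => PySem.List.pySetD x c true) b := by
  intro l
  induction l with
  | nil => intro b _; rfl
  | cons c l ih =>
    intro b hb
    by_cases hq : q c = true
    · have hno : PySem.List.pySetD b c true = b :=
        dl_pySetD_true_self (hb c (List.mem_cons_self ..) hq)
      simp only [List.foldl_cons, List.filter_cons, hq, Bool.not_true, hno]
      exact ih b (fun c' hc' => hb c' (List.mem_cons_of_mem _ hc'))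
    · simp only [List.foldl_cons, List.filter_cons, Bool.not_eq_true'] at *
      rw [if_pos (by simpa using hq)]
      rw [List.foldl_cons]
      exact ih (PySem.List.pySetD b c true) (fun c' hc' hq' =>
        dl_pyGetD_pySetD_true (hb c' (List.mem_cons_of_mem _ hc') hq'))

lemma dl_foldl_flatMap {α β γ : Type} (g : α → List β) (f : γ → β → γ) :
    ∀ (l : List α) (a : γ),
      l.foldl (fun acc c => (g c).foldl f acc) a = ((l.flatMap g).foldl f a) := by
  intro l
  induction l with
  | nil => intro a; rfl
  | cons c l ih => intro a; simp [List.foldl_cons, List.flatMap_cons, List.foldl_append, ih]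

lemma dl_ofList_filter (p : Int → Bool) :
    ∀ l : List Int, PySem.Set.ofList (l.filter p) = (PySem.Set.ofList l).filter p := by
  intro l
  induction l with
  | nil => rfl
  | cons x l ih =>
    rw [PySem.Set.ofList_cons, List.filter_cons]
    by_cases hp : p x = true
    · rw [if_pos hp, PySem.Set.ofList_cons, ih]
      unfold PySem.Set.discard
      rw [List.filter_cons, if_pos hp, List.filter_filter]
      congr 1
      rw [List.filter_filter]
      exact List.filter_congr (fun a _ => by cases p a <;> cases (a == x) <;> simp)
    · rw [if_neg (by simpa using hp), ih]
      simp only [List.filter_cons, hp]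
      unfold PySem.Set.discard
      rw [List.filter_filter]
      have : ∀ a : Int, (p a && !(a == x)) = p a := by
        intro a
        by_cases hax : a = x
        · subst hax; simp [hp]
        · simp [hax]
      rw [List.filter_congr (fun a _ => this a)]
      simp

def dlV (L : List (List Int)) (i : Int) (j : Nat) : Int :=
  PySem.List.pyGetD (PySem.List.pyGetD L (j : Int) []) i 0

lemma dl_agree_set {cr : List Int} {j j' : Nat} (h : j' ≠ j) (w : Int) :
    PySem.List.pyGetD (PySem.List.pySetD cr (j : Int) w) (j' : Int) 0
      = PySem.List.pyGetD cr (j' : Int) 0 := by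
  simp only [PySem.List.pySetD_natCast, PySem.List.pyGetD_natCast]
  rw [List.getD_eq_getElem?_getD, List.getD_eq_getElem?_getD, List.getElem?_set,
    if_neg (fun hh => h hh.symm)]

lemma dl_innerA (L : List (List Int)) (i : Int) (bc : List Bool) (core : List Int) :
    ∀ (js : List Nat), js.Nodup →
      ∀ (d : PySem.Dict Int (List Int)) (cr : List Int),
      (∀ j ∈ js, PySem.List.pyGetD cr (j : Int) 0 = PySem.List.pyGetD core (j : Int) 0) →
      js.foldl (fun (st2 : PySem.Dict Int (List Int) × List Int) (j : Nat) =>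
        if PySem.List.pyGetD st2.2 (j : Int) 0 ≠ 0 then st2
        else
          let cell := PySem.List.pyGetD (PySem.List.pyGetD L (j : Int) []) i 0
          if cell = 0 then st2
          else if PySem.List.pyGetD bc cell false = true then
            (st2.1, PySem.List.pySetD st2.2 (j : Int) (i + 1))
          else if st2.1.contains cell then
            (st2.1.modify cell [] (· ++ [(j : Int)]), st2.2)
          else
            (st2.1.insert cell [(j : Int)], st2.2)) (d, cr)
      = ((js.filter (fun (j : Nat) => decide (PySem.List.pyGetD core (j : Int) 0 = 0)
            && !decide (dlV L i j = 0) && !(PySem.List.pyGetD bc (dlV L i j) false))).foldl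
            (fun d (j : Nat) => d.modify (dlV L i j) [] (· ++ [(j : Int)])) d,
         (js.filter (fun (j : Nat) => decide (PySem.List.pyGetD core (j : Int) 0 = 0)
            && !decide (dlV L i j = 0) && (PySem.List.pyGetD bc (dlV L i j) false))).foldl
            (fun cr (j : Nat) => PySem.List.pySetD cr (j : Int) (i + 1)) cr) := by
  unfold dlV
  intro js
  induction js with
  | nil => intro _ d cr _; rfl
  | cons j js ih =>
    intro hnd d cr hag
    have hnd' := (List.nodup_cons.mp hnd).2
    have hjnot := (List.nodup_cons.mp hnd).1
    have hagj := hag j (List.mem_cons_self ..)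
    have hagtl : ∀ j' ∈ js, PySem.List.pyGetD cr (j' : Int) 0 = PySem.List.pyGetD core (j' : Int) 0 :=
      fun j' hj' => hag j' (List.mem_cons_of_mem _ hj')
    rw [List.foldl_cons, List.filter_cons, List.filter_cons]
    dsimp only
    by_cases hact : PySem.List.pyGetD core (j : Int) 0 = 0
    · have hcr0 : PySem.List.pyGetD cr (j : Int) 0 = 0 := hagj.trans hact
      rw [if_neg (not_not_intro hcr0)]
      by_cases hv0 : PySem.List.pyGetD (PySem.List.pyGetD L (j : Int) []) i 0 = 0
      · rw [if_pos hv0,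
          if_neg (by rw [decide_eq_true hact, decide_eq_true hv0]; simp : ¬ (decide (PySem.List.pyGetD core (j : Int) 0 = 0)
            && !decide (PySem.List.pyGetD (PySem.List.pyGetD L (j : Int) []) i 0 = 0)
            && !(PySem.List.pyGetD bc (PySem.List.pyGetD (PySem.List.pyGetD L (j : Int) []) i 0) false)) = true),
          if_neg (by rw [decide_eq_true hact, decide_eq_true hv0]; simp : ¬ (decide (PySem.List.pyGetD core (j : Int) 0 = 0)
            && !decide (PySem.List.pyGetD (PySem.List.pyGetD L (j : Int) []) i 0 = 0)
            && (PySem.List.pyGetD bc (PySem.List.pyGetD (PySem.List.pyGetD L (j : Int) []) i 0) false)) = true)]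
        exact ih hnd' d cr hagtl
      · rw [if_neg hv0]
        by_cases hbg : PySem.List.pyGetD bc (PySem.List.pyGetD (PySem.List.pyGetD L (j : Int) []) i 0) false = true
        · have hbgx : PySem.List.pyGetD bc (PySem.List.pyGetD (PySem.List.pyGetD L (j : Int) []) i 0) false = true := hbg
          rw [if_pos hbg,
            if_neg (by rw [decide_eq_true hact, decide_eq_false hv0, hbgx]; simp : ¬ (decide (PySem.List.pyGetD core (j : Int) 0 = 0)
              && !decide (PySem.List.pyGetD (PySem.List.pyGetD L (j : Int) []) i 0 = 0)
              && !(PySem.List.pyGetD bc (PySem.List.pyGetD (PySem.List.pyGetD L (j : Int) []) i 0) false)) = true),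
            if_pos (by rw [decide_eq_true hact, decide_eq_false hv0, hbgx]; simp : (decide (PySem.List.pyGetD core (j : Int) 0 = 0)
              && !decide (PySem.List.pyGetD (PySem.List.pyGetD L (j : Int) []) i 0 = 0)
              && (PySem.List.pyGetD bc (PySem.List.pyGetD (PySem.List.pyGetD L (j : Int) []) i 0) false)) = true),
            List.foldl_cons]
          exact ih hnd' d (PySem.List.pySetD cr (j : Int) (i + 1))
            (fun j' hj' => (dl_agree_set (fun he => hjnot (by rwa [he] at hj')) _).trans (hagtl j' hj'))
        · have hbgx : PySem.List.pyGetD bc (PySem.List.pyGetD (PySem.List.pyGetD L (j : Int) []) i 0) false = false := by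
            cases hx : PySem.List.pyGetD bc (PySem.List.pyGetD (PySem.List.pyGetD L (j : Int) []) i 0) false
            · rfl
            · exact absurd hx hbg
          rw [if_neg hbg]
          have hmod : (if d.contains (PySem.List.pyGetD (PySem.List.pyGetD L (j : Int) []) i 0) then
              (d.modify (PySem.List.pyGetD (PySem.List.pyGetD L (j : Int) []) i 0) [] (· ++ [(j : Int)]), cr)
            else (d.insert (PySem.List.pyGetD (PySem.List.pyGetD L (j : Int) []) i 0) [(j : Int)], cr))
            = (d.modify (PySem.List.pyGetD (PySem.List.pyGetD L (j : Int) []) i 0) [] (· ++ [(j : Int)]), cr) := by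
            by_cases hc : d.contains (PySem.List.pyGetD (PySem.List.pyGetD L (j : Int) []) i 0) = true
            · rw [if_pos hc]
            · have hc' : d.contains (PySem.List.pyGetD (PySem.List.pyGetD L (j : Int) []) i 0) = false := by
                cases hx : d.contains (PySem.List.pyGetD (PySem.List.pyGetD L (j : Int) []) i 0)
                · rfl
                · exact absurd hx hc
              rw [if_neg (by rw [hc']; simp)]
              unfold PySem.Dict.modify
              rw [PySem.Dict.getD_of_not_contains d ([] : List Int) hc']
              rfl
          rw [hmod,
            if_pos (by rw [decide_eq_true hact, decide_eq_false hv0, hbgx]; simp : (decide (PySem.List.pyGetD core (j : Int) 0 = 0)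
              && !decide (PySem.List.pyGetD (PySem.List.pyGetD L (j : Int) []) i 0 = 0)
              && !(PySem.List.pyGetD bc (PySem.List.pyGetD (PySem.List.pyGetD L (j : Int) []) i 0) false)) = true),
            if_neg (by rw [decide_eq_true hact, decide_eq_false hv0, hbgx]; simp : ¬ (decide (PySem.List.pyGetD core (j : Int) 0 = 0)
              && !decide (PySem.List.pyGetD (PySem.List.pyGetD L (j : Int) []) i 0 = 0)
              && (PySem.List.pyGetD bc (PySem.List.pyGetD (PySem.List.pyGetD L (j : Int) []) i 0) false)) = true),
            List.foldl_cons]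
          exact ih hnd' (d.modify (PySem.List.pyGetD (PySem.List.pyGetD L (j : Int) []) i 0) [] (· ++ [(j : Int)])) cr hagtl
    · have hcrne : PySem.List.pyGetD cr (j : Int) 0 ≠ 0 := fun h => hact (hagj.symm.trans h)
      rw [if_pos hcrne,
        if_neg (by rw [decide_eq_false hact]; simp : ¬ (decide (PySem.List.pyGetD core (j : Int) 0 = 0)
          && !decide (PySem.List.pyGetD (PySem.List.pyGetD L (j : Int) []) i 0 = 0)
          && !(PySem.List.pyGetD bc (PySem.List.pyGetD (PySem.List.pyGetD L (j : Int) []) i 0) false)) = true),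
        if_neg (by rw [decide_eq_false hact]; simp : ¬ (decide (PySem.List.pyGetD core (j : Int) 0 = 0)
          && !decide (PySem.List.pyGetD (PySem.List.pyGetD L (j : Int) []) i 0 = 0)
          && (PySem.List.pyGetD bc (PySem.List.pyGetD (PySem.List.pyGetD L (j : Int) []) i 0) false)) = true)]
      exact ih hnd' d cr hagtl

lemma dl_dictA_getD (v : Nat → Int) (js : List Nat) (c : Int) :
    (js.foldl (fun d (j : Nat) => d.modify (v j) [] (· ++ [(j : Int)])) PySem.Dict.empty).getD c []
      = (js.filter (fun j => v j == c)).map (fun (j : Nat) => (j : Int)) := by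
  have h1 : ((js.map (fun (j : Nat) => (v j, (j : Int)))).foldl
      (fun d (p : Int × Int) => d.modify p.1 [] (· ++ [p.2])) PySem.Dict.empty)
      = js.foldl (fun d (j : Nat) => d.modify (v j) [] (· ++ [(j : Int)])) PySem.Dict.empty :=
    List.foldl_map
  rw [← h1, PySem.Dict.getD_foldl_modify_append, PySem.Dict.getD_empty, List.nil_append,
    List.filter_map, List.map_map]
  rfl

lemma dl_dictA_keys (v : Nat → Int) (js : List Nat) :
    (js.foldl (fun d (j : Nat) => d.modify (v j) [] (· ++ [(j : Int)])) PySem.Dict.empty).keys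
      = PySem.Set.ofList (js.map v) := by
  rw [PySem.Dict.keys_foldl_modify_key js v [] (fun _ j => (· ++ [(j : Int)])),
    PySem.Dict.keys_empty, PySem.Set.update_nil_left]

lemma dl_counts_getD (v : Nat → Int) (js : List Nat) (c : Int) :
    (js.foldl (fun (d : PySem.Dict Int Int) (j : Nat) => d.modify (v j) 0 (· + 1)) PySem.Dict.empty).getD c 0
      = ((js.map v).count c : Int) := by
  have h1 : ((js.map v).foldl (fun (d : PySem.Dict Int Int) (x : Int) => d.modify x 0 (· + 1)) PySem.Dict.empty)
      = js.foldl (fun (d : PySem.Dict Int Int) (j : Nat) => d.modify (v j) 0 (· + 1)) PySem.Dict.empty :=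
    List.foldl_map
  calc (js.foldl (fun (d : PySem.Dict Int Int) (j : Nat) => d.modify (v j) 0 (· + 1)) PySem.Dict.empty).getD c 0
      = ((js.map v).foldl (fun (d : PySem.Dict Int Int) (x : Int) => d.modify x 0 (· + 1)) PySem.Dict.empty).getD c 0 :=
        (congrArg (fun d => PySem.Dict.getD d c 0) h1).symm
    _ = ((js.map v).count c : Int) := by
        rw [PySem.Dict.getD_foldl_modify_add_one, PySem.Dict.getD_empty, zero_add]

lemma dl_counts_keys (v : Nat → Int) (js : List Nat) :
    (js.foldl (fun (d : PySem.Dict Int Int) (j : Nat) => d.modify (v j) 0 (· + 1)) PySem.Dict.empty).keys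
      = PySem.Set.ofList (js.map v) := by
  rw [PySem.Dict.keys_foldl_modify_key js v 0 (fun _ _ => (· + 1)),
    PySem.Dict.keys_empty, PySem.Set.update_nil_left]

def dlColA (L : List (List Int)) (n : Int) (st : List Bool × List Int) (i : Int) : List Bool × List Int :=
  let inner := (PySem.List.pyRange 0 n 1).foldl
    (fun (st2 : PySem.Dict Int (List Int) × List Int) j =>
      if PySem.List.pyGetD st2.2 j 0 ≠ 0 then st2
      else
        let cell := PySem.List.pyGetD (PySem.List.pyGetD L j []) i 0
        if cell = 0 then st2
        else if PySem.List.pyGetD st.1 cell false = true then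
          (st2.1, PySem.List.pySetD st2.2 j (i + 1))
        else if st2.1.contains cell then
          (st2.1.modify cell [] (· ++ [j]), st2.2)
        else
          (st2.1.insert cell [j], st2.2))
    (PySem.Dict.empty, st.2)
  let cells := inner.1
  cells.keys.foldl (fun (st3 : List Bool × List Int) cell =>
    let cores := cells.getD cell []
    if cores.length > 1 then
      (PySem.List.pySetD st3.1 cell true,
       cores.foldl (fun bc core => PySem.List.pySetD bc core (i + 1)) st3.2)
    else st3)
    (st.1, inner.2)

def dlColB (L : List (List Int)) (n : Int) (st : PySem.Set Int × List Int) (i : Int) : PySem.Set Int × List Int :=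
  let locked := st.1
  let prev := st.2
  let clash : Int → Bool := fun j =>
    (PySem.List.pyRange 0 n 1).any (fun h =>
      decide (¬ h = j) && decide (PySem.List.pyGetD prev h 0 = 0) &&
      decide (PySem.List.pyGetD (PySem.List.pyGetD L h []) i 0
                = PySem.List.pyGetD (PySem.List.pyGetD L j []) i 0))
  let res' := (PySem.List.pyRange 0 n 1).map (fun j =>
    if PySem.List.pyGetD prev j 0 = 0 ∧
       PySem.List.pyGetD (PySem.List.pyGetD L j []) i 0 ≠ 0 ∧
       (PySem.Set.contains locked (PySem.List.pyGetD (PySem.List.pyGetD L j []) i 0) = true ∨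
        clash j = true)
    then i + 1 else PySem.List.pyGetD prev j 0)
  let locked' := PySem.Set.union locked (PySem.Set.ofList
    (((PySem.List.pyRange 0 n 1).filter (fun j =>
        decide (PySem.List.pyGetD prev j 0 = 0) &&
        decide (PySem.List.pyGetD (PySem.List.pyGetD L j []) i 0 ≠ 0) && clash j)).map
      (fun j => PySem.List.pyGetD (PySem.List.pyGetD L j []) i 0)))
  (locked', res')

lemma dl_portA_eq (n m k : Int) (L : List (List Int)) :
    deadlock_situation n m k L
      = ((PySem.List.pyRange 0 m 1).foldl (dlColA L n)
          (List.replicate (k + 1).toNat false, List.replicate n.toNat 0)).2 := rfl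

lemma dl_portB_eq (n m k : Int) (L : List (List Int)) :
    deadlock_situation_alt n m k L
      = ((PySem.List.pyRange 0 m 1).foldl (dlColB L n)
          ((PySem.Set.empty : PySem.Set Int), List.replicate n.toNat 0)).2 := rfl

def dlJsA (v : Nat → Int) (bc : List Bool) (core : List Int) (N : Nat) : List Nat :=
  (List.range N).filter (fun (j : Nat) => decide (PySem.List.pyGetD core (j : Int) 0 = 0)
    && !decide (v j = 0) && !(PySem.List.pyGetD bc (v j) false))

def dlJsS (v : Nat → Int) (bc : List Bool) (core : List Int) (N : Nat) : List Nat :=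
  (List.range N).filter (fun (j : Nat) => decide (PySem.List.pyGetD core (j : Int) 0 = 0)
    && !decide (v j = 0) && (PySem.List.pyGetD bc (v j) false))

def dlJsB (v : Nat → Int) (core : List Int) (N : Nat) : List Nat :=
  (List.range N).filter (fun (j : Nat) => decide (¬ v j = 0) && (PySem.List.pyGetD core (j : Int) 0 == 0))

def dlDictA (v : Nat → Int) (bc : List Bool) (core : List Int) (N : Nat) : PySem.Dict Int (List Int) :=
  (dlJsA v bc core N).foldl (fun d (j : Nat) => d.modify (v j) [] (· ++ [(j : Int)])) PySem.Dict.empty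

def dlCnts (v : Nat → Int) (core : List Int) (N : Nat) : PySem.Dict Int Int :=
  (dlJsB v core N).foldl (fun (d : PySem.Dict Int Int) (j : Nat) => d.modify (v j) 0 (· + 1)) PySem.Dict.empty

lemma dl_col_abstract (v : Nat → Int) (bc : List Bool) (core : List Int) (N : Nat) (w : Int)
    (hlen : core.length = N) :
    ((dlDictA v bc core N).keys.foldl
       (fun (st3 : List Bool × List Int) cell =>
         if ((dlDictA v bc core N).getD cell []).length > 1 then
           (PySem.List.pySetD st3.1 cell true,
            ((dlDictA v bc core N).getD cell []).foldl (fun b c => PySem.List.pySetD b c w) st3.2)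
         else st3)
       (bc, (dlJsS v bc core N).foldl (fun cr (j : Nat) => PySem.List.pySetD cr (j : Int) w) core))
    = ((dlCnts v core N).keys.foldl
         (fun b c => if (dlCnts v core N).getD c 0 ≥ 2 then PySem.List.pySetD b c true else b) bc,
       (List.range N).map (fun (j : Nat) =>
         if PySem.List.pyGetD core (j : Int) 0 = 0 ∧ ¬ v j = 0 ∧
            (PySem.List.pyGetD bc (v j) false = true ∨ (dlCnts v core N).getD (v j) 0 ≥ 2)
         then w else PySem.List.pyGetD core (j : Int) 0)) := by
  -- basic list relations
  have hB' : dlJsB v core N = (List.range N).filter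
      (fun (j : Nat) => decide (PySem.List.pyGetD core (j : Int) 0 = 0) && !decide (v j = 0)) := by
    unfold dlJsB
    exact List.filter_congr (fun j _ => by
      by_cases h1 : v j = 0 <;> by_cases h2 : PySem.List.pyGetD core (j : Int) 0 = 0 <;>
        simp [h1, h2, Bool.beq_eq_decide_eq])
  have hA : dlJsA v bc core N
      = (dlJsB v core N).filter (fun j => !(PySem.List.pyGetD bc (v j) false)) := by
    rw [hB', List.filter_filter]
    unfold dlJsA
    exact List.filter_congr (fun j _ => by
      cases hb : PySem.List.pyGetD bc (v j) false <;>
        cases h1 : decide (PySem.List.pyGetD core (j : Int) 0 = 0) <;>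
          cases h2 : decide (v j = 0) <;> simp)
  have hmapA : (dlJsA v bc core N).map v
      = ((dlJsB v core N).map v).filter (fun c => !(PySem.List.pyGetD bc c false)) := by
    rw [hA, List.filter_map]; rfl
  have hkeysA : (dlDictA v bc core N).keys
      = (PySem.Set.ofList ((dlJsB v core N).map v)).filter
          (fun c => !(PySem.List.pyGetD bc c false)) := by
    unfold dlDictA
    rw [dl_dictA_keys v, hmapA, dl_ofList_filter]
  have hkeysB : (dlCnts v core N).keys = PySem.Set.ofList ((dlJsB v core N).map v) := by
    unfold dlCnts; exact dl_counts_keys v _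
  have hcnt : ∀ c, (dlCnts v core N).getD c 0 = (((dlJsB v core N).map v).count c : Int) := by
    intro c; unfold dlCnts; exact dl_counts_getD v _ c
  have hlstA : ∀ c, (dlDictA v bc core N).getD c []
      = ((dlJsA v bc core N).filter (fun j => v j == c)).map (fun (j : Nat) => (j : Int)) := by
    intro c; unfold dlDictA; exact dl_dictA_getD v _ c
  have hcntA : ∀ c, PySem.List.pyGetD bc c false = false →
      ((dlJsA v bc core N).filter (fun j => v j == c)).length
        = ((dlJsB v core N).map v).count c := by
    intro c hbgc
    have h1 : ((dlJsA v bc core N).map v).filter (fun x => x == c)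
        = ((dlJsA v bc core N).filter (fun j => v j == c)).map v := by
      rw [List.filter_map]; rfl
    have h2 : ((dlJsA v bc core N).filter (fun j => v j == c)).length
        = ((dlJsA v bc core N).map v).count c := by
      rw [List.count_eq_length_filter, h1, List.length_map]
    rw [h2, hmapA, List.count_filter (by simp [hbgc])]
  -- split the resolve fold into independent components
  have hsplit : (fun (st3 : List Bool × List Int) (cell : Int) =>
      if ((dlDictA v bc core N).getD cell []).length > 1 then
        (PySem.List.pySetD st3.1 cell true,
         ((dlDictA v bc core N).getD cell []).foldl (fun b c => PySem.List.pySetD b c w) st3.2)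
      else st3)
    = (fun (st3 : List Bool × List Int) (cell : Int) =>
        ((fun (b : List Bool) (cell : Int) =>
            if ((dlDictA v bc core N).getD cell []).length > 1 then PySem.List.pySetD b cell true else b) st3.1 cell,
         (fun (r : List Int) (cell : Int) =>
            if ((dlDictA v bc core N).getD cell []).length > 1 then
              ((dlDictA v bc core N).getD cell []).foldl (fun b c => PySem.List.pySetD b c w) r
            else r) st3.2 cell)) := by
    funext st3 cell
    by_cases h : ((dlDictA v bc core N).getD cell []).length > 1 <;> simp [h]
  rw [hsplit, PySem.List.foldl_prod_mk
    (f := fun (b : List Bool) (cell : Int) =>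
      if ((dlDictA v bc core N).getD cell []).length > 1 then PySem.List.pySetD b cell true else b)
    (g := fun (r : List Int) (cell : Int) =>
      if ((dlDictA v bc core N).getD cell []).length > 1 then
        ((dlDictA v bc core N).getD cell []).foldl (fun b c => PySem.List.pySetD b c w) r
      else r)]
  refine Prod.ext ?_ ?_
  · -- blockedCell component
    show ((dlDictA v bc core N).keys.foldl
        (fun (b : List Bool) (cell : Int) =>
          if ((dlDictA v bc core N).getD cell []).length > 1 then PySem.List.pySetD b cell true else b) bc)
      = ((dlCnts v core N).keys.foldl
          (fun b c => if (dlCnts v core N).getD c 0 ≥ 2 then PySem.List.pySetD b c true else b) bc)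
    rw [PySem.List.foldl_ite_eq_foldl_filter
        (fun (cell : Int) => ((dlDictA v bc core N).getD cell []).length > 1)
        (fun (b : List Bool) (cell : Int) => PySem.List.pySetD b cell true),
      PySem.List.foldl_ite_eq_foldl_filter
        (fun (c : Int) => (dlCnts v core N).getD c 0 ≥ 2)
        (fun (b : List Bool) (c : Int) => PySem.List.pySetD b c true)]
    conv_rhs => rw [dl_setTrue_drop (fun c => PySem.List.pyGetD bc c false) _ bc (fun c _ h => h)]
    rw [hkeysA, hkeysB, List.filter_filter, List.filter_filter]
    refine congrArg _ (List.filter_congr ?_)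
    intro c _
    cases hb : PySem.List.pyGetD bc c false
    · have hlen2 : ((dlDictA v bc core N).getD c []).length
          = ((dlJsB v core N).map v).count c := by
        rw [hlstA c, List.length_map, hcntA c hb]
      simp only [hlen2, hcnt c, Bool.not_false, Bool.and_true, Bool.true_and]
      exact decide_eq_decide.mpr (by omega)
    · simp
  · -- core component
    show ((dlDictA v bc core N).keys.foldl
        (fun (r : List Int) (cell : Int) =>
          if ((dlDictA v bc core N).getD cell []).length > 1 then
            ((dlDictA v bc core N).getD cell []).foldl (fun b c => PySem.List.pySetD b c w) r
          else r)
        ((dlJsS v bc core N).foldl (fun cr (j : Nat) => PySem.List.pySetD cr (j : Int) w) core))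
      = (List.range N).map (fun (j : Nat) =>
          if PySem.List.pyGetD core (j : Int) 0 = 0 ∧ ¬ v j = 0 ∧
             (PySem.List.pyGetD bc (v j) false = true ∨ (dlCnts v core N).getD (v j) 0 ≥ 2)
          then w else PySem.List.pyGetD core (j : Int) 0)
    rw [PySem.List.foldl_ite_eq_foldl_filter
        (fun (cell : Int) => ((dlDictA v bc core N).getD cell []).length > 1)
        (fun (r : List Int) (cell : Int) =>
          ((dlDictA v bc core N).getD cell []).foldl (fun b c => PySem.List.pySetD b c w) r)]
    rw [dl_foldl_flatMap (fun cell => (dlDictA v bc core N).getD cell [])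
        (fun b c => PySem.List.pySetD b c w)]
    simp only [hlstA]
    rw [← List.map_flatMap, List.foldl_map]
    simp only [PySem.List.pySetD_natCast]
    apply List.ext_getElem?
    intro t
    rw [dl_foldl_set_getElem? w, dl_foldl_set_getElem? w, dl_foldl_set_length w, hlen,
      List.getElem?_map]
    by_cases ht : t < N
    · have htc : t < core.length := by omega
      rw [List.getElem?_range ht, Option.map_some]
      have hget : core[t]?.getD 0 = core[t] := by
        rw [List.getElem?_eq_getElem htc]; rfl
      have hcoreT : core[t]? = some core[t] := List.getElem?_eq_getElem htc
      have hpg : PySem.List.pyGetD core (t : Int) 0 = core[t] := by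
        simp [List.getD_eq_getElem?_getD, hget]
      rw [hpg]
      have hmemS : t ∈ dlJsS v bc core N ↔
          (core[t] = 0 ∧ ¬ v t = 0 ∧ PySem.List.pyGetD bc (v t) false = true) := by
        unfold dlJsS
        simp [List.mem_filter, List.mem_range, ht, and_assoc, hget]
      have hmemA : t ∈ dlJsA v bc core N ↔
          (core[t] = 0 ∧ ¬ v t = 0 ∧ PySem.List.pyGetD bc (v t) false = false) := by
        unfold dlJsA
        simp [List.mem_filter, List.mem_range, ht, and_assoc, hget]
      have hmemF : t ∈ (List.flatMap (fun cell => List.filter (fun j => v j == cell) (dlJsA v bc core N))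
          (List.filter
            (fun x => decide ((List.map (fun (j : Nat) => (j : Int)) (List.filter (fun j => v j == x) (dlJsA v bc core N))).length > 1))
            (dlDictA v bc core N).keys)) ↔
          (core[t] = 0 ∧ ¬ v t = 0 ∧
            PySem.List.pyGetD bc (v t) false = false ∧
            (dlCnts v core N).getD (v t) 0 ≥ 2) := by
        rw [List.mem_flatMap]
        constructor
        · rintro ⟨c, hc, ht2⟩
          rw [List.mem_filter] at ht2
          have hvc : v t = c := by simpa using ht2.2
          have htA := hmemA.mp ht2.1
          refine ⟨htA.1, htA.2.1, htA.2.2, ?_⟩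
          rw [List.mem_filter] at hc
          have hlen3 := of_decide_eq_true hc.2
          rw [List.length_map, ← hvc] at hlen3
          rw [hcnt (v t), ← hcntA (v t) htA.2.2]
          exact_mod_cast by omega
        · rintro ⟨hq, hv, hbf, hc2⟩
          refine ⟨v t, ?_, ?_⟩
          · rw [List.mem_filter]
            constructor
            · unfold dlDictA
              rw [dl_dictA_keys v, PySem.Set.mem_ofList, List.mem_map]
              exact ⟨t, hmemA.mpr ⟨hq, hv, hbf⟩, rfl⟩
            · rw [hcnt (v t), ← hcntA (v t) hbf] at hc2
              rw [List.length_map]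
              exact decide_eq_true (by exact_mod_cast by omega)
          · rw [List.mem_filter]
            exact ⟨hmemA.mpr ⟨hq, hv, hbf⟩, by simp⟩
      by_cases hq : core[t] = 0
      · by_cases hv : v t = 0
        · rw [if_neg (fun h => (hmemF.mp h.1).2.1 hv), if_neg (fun h => (hmemS.mp h.1).2.1 hv),
            hcoreT, if_neg (fun h => h.2.1 hv)]
        · by_cases hbg : PySem.List.pyGetD bc (v t) false = true
          · rw [if_neg (fun h => Bool.noConfusion (hbg ▸ (hmemF.mp h.1).2.2.1)),
              if_pos ⟨hmemS.mpr ⟨hq, hv, hbg⟩, ht⟩,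
              if_pos ⟨hq, hv, Or.inl hbg⟩]
          · have hbgf : PySem.List.pyGetD bc (v t) false = false := by
              cases hx : PySem.List.pyGetD bc (v t) false
              · rfl
              · exact absurd hx hbg
            by_cases hc2 : (dlCnts v core N).getD (v t) 0 ≥ 2
            · rw [if_pos ⟨hmemF.mpr ⟨hq, hv, hbgf, hc2⟩, ht⟩,
                if_pos ⟨hq, hv, Or.inr hc2⟩]
            · rw [if_neg (fun h => hc2 (hmemF.mp h.1).2.2.2),
                if_neg (fun h => hbg (hmemS.mp h.1).2.2),
                hcoreT, if_neg (by
                  rintro ⟨-, -, hor⟩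
                  rcases hor with hbt | hct
                  · exact hbg hbt
                  · exact hc2 hct)]
      · rw [if_neg (fun h => hq (hmemF.mp h.1).1), if_neg (fun h => hq (hmemS.mp h.1).1),
          hcoreT, if_neg (fun h => hq h.1)]
    · rw [if_neg (fun h => ht h.2), if_neg (fun h => ht h.2),
        List.getElem?_eq_none (by omega : core.length ≤ t),
        List.getElem?_eq_none (by simpa using (by omega : N ≤ t))]
      rfl

lemma dl_colA_abs (L : List (List Int)) (n i : Int) (bc : List Bool) (core : List Int)
    (hlen : core.length = n.toNat) :
    dlColA L n (bc, core) i
      = ((dlCnts (dlV L i) core n.toNat).keys.foldl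
          (fun b c => if (dlCnts (dlV L i) core n.toNat).getD c 0 ≥ 2 then PySem.List.pySetD b c true else b) bc,
         (List.range n.toNat).map (fun (j : Nat) =>
           if PySem.List.pyGetD core (j : Int) 0 = 0 ∧ ¬ dlV L i j = 0 ∧
              (PySem.List.pyGetD bc (dlV L i j) false = true ∨
               (dlCnts (dlV L i) core n.toNat).getD (dlV L i j) 0 ≥ 2)
           then i + 1 else PySem.List.pyGetD core (j : Int) 0)) := by
  unfold dlColA
  dsimp only
  rw [PySem.List.pyRange_zero n, List.foldl_map,
    dl_innerA L i bc core (List.range n.toNat) (List.nodup_range) PySem.Dict.empty core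
      (fun _ _ => rfl)]
  dsimp only
  exact dl_col_abstract (dlV L i) bc core n.toNat (i + 1) hlen

-- invariant relating A's blockedCell array to B's set of locked cell values
def dlInv (k : Int) (bc : List Bool) (S : List Int) : Prop :=
  bc.length = (k + 1).toNat ∧
  ∀ c : Int, 0 ≤ c → c ≤ k → (PySem.List.pyGetD bc c false = true ↔ c ∈ S)

lemma dl_mem_dlJsB (v : Nat → Int) (core : List Int) (N : Nat) (j : Nat) :
    j ∈ dlJsB v core N ↔ j < N ∧ v j ≠ 0 ∧ PySem.List.pyGetD core (j : Int) 0 = 0 := by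
  unfold dlJsB
  simp [List.mem_filter, List.mem_range]

lemma dl_clash_iff (v : Nat → Int) (core : List Int) (N : Nat) (j : Nat)
    (hj : j < N) (hv : v j ≠ 0) (h0 : PySem.List.pyGetD core (j : Int) 0 = 0) :
    ((∃ h : Nat, h < N ∧ h ≠ j ∧ PySem.List.pyGetD core (h : Int) 0 = 0 ∧ v h = v j) ↔
      2 ≤ ((dlJsB v core N).map v).count (v j)) := by
  have hF : ∀ h : Nat, h ∈ (dlJsB v core N).filter (fun x => v x == v j) ↔
      (h < N ∧ PySem.List.pyGetD core (h : Int) 0 = 0 ∧ v h = v j) := by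
    intro h
    rw [List.mem_filter, dl_mem_dlJsB]
    constructor
    · rintro ⟨⟨h1, h2, h3⟩, h4⟩; exact ⟨h1, h3, by simpa using h4⟩
    · rintro ⟨h1, h3, h4⟩
      exact ⟨⟨h1, by rw [h4]; exact hv, h3⟩, by simpa using h4⟩
  have hnd : ((dlJsB v core N).filter (fun x => v x == v j)).Nodup :=
    (List.nodup_range.filter _).filter _
  have hjF : j ∈ (dlJsB v core N).filter (fun x => v x == v j) := (hF j).mpr ⟨hj, h0, rfl⟩
  have hcount : ((dlJsB v core N).map v).count (v j)
      = ((dlJsB v core N).filter (fun x => v x == v j)).length := by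
    rw [List.count_eq_length_filter, List.filter_map, List.length_map]
    rfl
  rw [hcount]
  constructor
  · rintro ⟨h, h1, h2, h3, h4⟩
    have hhF : h ∈ (dlJsB v core N).filter (fun x => v x == v j) := (hF h).mpr ⟨h1, h3, h4⟩
    have hmem : h ∈ ((dlJsB v core N).filter (fun x => v x == v j)).erase j :=
      (List.Nodup.mem_erase_iff hnd).mpr ⟨h2, hhF⟩
    have hpos := List.length_pos_of_mem hmem
    rw [List.length_erase_of_mem hjF] at hpos
    omega
  · intro h2
    obtain ⟨h, hmem⟩ := List.exists_mem_of_length_pos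
      (show 0 < (((dlJsB v core N).filter (fun x => v x == v j)).erase j).length by
        rw [List.length_erase_of_mem hjF]; omega)
    have hh := (List.Nodup.mem_erase_iff hnd).mp hmem
    obtain ⟨hh1, hh2, hh3⟩ := (hF h).mp hh.2
    exact ⟨h, hh1, hh.1, hh2, hh3⟩

lemma dl_getD_foldl_setTrue (q : Int → Prop) [DecidablePred q] :
    ∀ (l : List Int) (bc : List Bool),
      (∀ x ∈ l, 0 ≤ x ∧ x.toNat < bc.length) →
      ((l.foldl (fun b x => if q x then PySem.List.pySetD b x true else b) bc).length = bc.length ∧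
       ∀ c : Int, 0 ≤ c →
        (PySem.List.pyGetD (l.foldl (fun b x => if q x then PySem.List.pySetD b x true else b) bc) c false = true
          ↔ PySem.List.pyGetD bc c false = true ∨ (c ∈ l ∧ q c))) := by
  intro l
  induction l with
  | nil => intro bc _; exact ⟨rfl, fun c _ => by simp⟩
  | cons x l ih =>
    intro bc hr
    have hx := hr x (List.mem_cons_self ..)
    have hstep : ∀ bc1 : List Bool, bc1.length = bc.length →
        (∀ y ∈ l, 0 ≤ y ∧ y.toNat < bc1.length) := by
      intro bc1 he y hy
      have := hr y (List.mem_cons_of_mem _ hy); omega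
    by_cases hq : q x
    · have hlen1 : (PySem.List.pySetD bc x true).length = bc.length :=
        PySem.List.length_pySetD bc x true
      obtain ⟨hl, hmain⟩ := ih (PySem.List.pySetD bc x true) (hstep _ hlen1)
      rw [List.foldl_cons, if_pos hq]
      refine ⟨hl.trans hlen1, fun c hc => ?_⟩
      rw [hmain c hc]
      have hget : PySem.List.pyGetD (PySem.List.pySetD bc x true) c false
          = if c = x then true else PySem.List.pyGetD bc c false := by
        rw [PySem.List.pySetD_of_nonneg bc true hx.1,
          PySem.List.pyGetD_of_nonneg _ false hc, PySem.List.pyGetD_of_nonneg bc false hc,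
          List.getD_eq_getElem?_getD, List.getD_eq_getElem?_getD, List.getElem?_set]
        by_cases he : c = x
        · rw [if_pos (by omega), if_pos he]
          have hxlt : x.toNat < bc.length := hx.2
          simp [hxlt]
        · rw [if_neg (by omega), if_neg he]
      rw [hget]
      by_cases he : c = x
      · subst he; simp [hq, List.mem_cons]
      · rw [if_neg he]
        constructor
        · rintro (h | ⟨h1, h2⟩)
          · exact Or.inl h
          · exact Or.inr ⟨List.mem_cons_of_mem _ h1, h2⟩
        · rintro (h | ⟨h1, h2⟩)
          · exact Or.inl h
          · rcases List.mem_cons.mp h1 with h1 | h1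
            · exact absurd h1 he
            · exact Or.inr ⟨h1, h2⟩
    · rw [List.foldl_cons, if_neg hq]
      obtain ⟨hl, hmain⟩ := ih bc (hstep _ rfl)
      refine ⟨hl, fun c hc => ?_⟩
      rw [hmain c hc]
      constructor
      · rintro (h | ⟨h1, h2⟩)
        · exact Or.inl h
        · exact Or.inr ⟨List.mem_cons_of_mem _ h1, h2⟩
      · rintro (h | ⟨h1, h2⟩)
        · exact Or.inl h
        · rcases List.mem_cons.mp h1 with h1 | h1
          · subst h1; exact absurd h2 hq
          · exact Or.inr ⟨h1, h2⟩

lemma dl_dlV_eq (L : List (List Int)) (i : Int) (jn : Nat) :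
    PySem.List.pyGetD (PySem.List.pyGetD L (jn : Nat) []) i 0 = dlV L i jn := rfl

lemma dl_clashB_eq (L : List (List Int)) (n i : Int) (core : List Int) (jn : Nat) :
    ((PySem.List.pyRange 0 n 1).any (fun h =>
        decide (¬ h = (jn : Int)) && decide (PySem.List.pyGetD core h 0 = 0) &&
        decide (PySem.List.pyGetD (PySem.List.pyGetD L h []) i 0 = dlV L i jn)) = true)
      ↔ (∃ h : Nat, h < n.toNat ∧ h ≠ jn ∧ PySem.List.pyGetD core (h : Int) 0 = 0 ∧
            dlV L i h = dlV L i jn) := by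
  rw [PySem.List.pyRange_zero n, List.any_map, List.any_eq_true]
  constructor
  · rintro ⟨h, hmem, hp⟩
    simp only [Function.comp, Bool.and_eq_true, decide_eq_true_eq] at hp
    exact ⟨h, List.mem_range.mp hmem, fun he => hp.1.1 (congrArg Nat.cast he), hp.1.2, hp.2⟩
  · rintro ⟨h, h1, h2, h3, h4⟩
    refine ⟨h, List.mem_range.mpr h1, ?_⟩
    simp only [Function.comp, Bool.and_eq_true, decide_eq_true_eq]
    exact ⟨⟨fun he => h2 (Nat.cast_inj.mp he), h3⟩, h4⟩

lemma dl_step (L : List (List Int)) (n k i : Int) (bc : List Bool) (core S : List Int)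
    (hlen : core.length = n.toNat) (hInv : dlInv k bc S)
    (hOk : ∀ j : Nat, j < n.toNat → dlV L i j = 0 ∨ (0 < dlV L i j ∧ dlV L i j ≤ k)) :
    (dlColA L n (bc, core) i).2 = (dlColB L n (S, core) i).2 ∧
    (dlColA L n (bc, core) i).2.length = n.toNat ∧
    dlInv k (dlColA L n (bc, core) i).1 (dlColB L n (S, core) i).1 := by
  obtain ⟨hbclen, hbcmem⟩ := hInv
  have hcnt : ∀ c, (dlCnts (dlV L i) core n.toNat).getD c 0
      = (((dlJsB (dlV L i) core n.toNat).map (dlV L i)).count c : Int) := by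
    intro c; unfold dlCnts; exact dl_counts_getD (dlV L i) _ c
  have hkeys : (dlCnts (dlV L i) core n.toNat).keys
      = PySem.Set.ofList ((dlJsB (dlV L i) core n.toNat).map (dlV L i)) := by
    unfold dlCnts; exact dl_counts_keys (dlV L i) _
  have hkeysR : ∀ x ∈ (dlCnts (dlV L i) core n.toNat).keys, 0 < x ∧ x ≤ k := by
    intro x hx
    rw [hkeys, PySem.Set.mem_ofList, List.mem_map] at hx
    obtain ⟨j, hj, hvj⟩ := hx
    obtain ⟨hj1, hj2, _⟩ := (dl_mem_dlJsB (dlV L i) core n.toNat j).mp hj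
    rcases hOk j hj1 with h | h
    · exact absurd h hj2
    · rw [← hvj]; exact h
  have hA := dl_colA_abs L n i bc core hlen
  have hclash : ∀ jn : Nat, jn < n.toNat → dlV L i jn ≠ 0 → PySem.List.pyGetD core (jn : Int) 0 = 0 →
      ((((List.range n.toNat).map (fun (j : Nat) => (j : Int))).any (fun h =>
          decide (¬ h = (jn : Int)) && decide (PySem.List.pyGetD core h 0 = 0) &&
          decide (PySem.List.pyGetD (PySem.List.pyGetD L h []) i 0 = dlV L i jn)) = true)
        ↔ (dlCnts (dlV L i) core n.toNat).getD (dlV L i jn) 0 ≥ 2) := by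
    intro jn h1 h2 h3
    have base : ((PySem.List.pyRange 0 n 1).any (fun h =>
          decide (¬ h = (jn : Int)) && decide (PySem.List.pyGetD core h 0 = 0) &&
          decide (PySem.List.pyGetD (PySem.List.pyGetD L h []) i 0 = dlV L i jn)) = true)
        ↔ (dlCnts (dlV L i) core n.toNat).getD (dlV L i jn) 0 ≥ 2 := by
      rw [dl_clashB_eq, dl_clash_iff (dlV L i) core n.toNat jn h1 h2 h3, hcnt (dlV L i jn)]
      constructor
      · intro h; exact_mod_cast h
      · intro h; exact_mod_cast h
    rw [PySem.List.pyRange_zero n] at base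
    exact base
  have hSmem : ∀ c : Int, 0 < c → c ≤ k →
      (PySem.Set.contains S c = true ↔ PySem.List.pyGetD bc c false = true) := by
    intro c h1 h2
    rw [PySem.Set.contains_iff, hbcmem c (by omega) h2]
  refine ⟨?_, ?_, ?_⟩
  · -- second components agree
    rw [hA]
    unfold dlColB
    dsimp only
    rw [PySem.List.pyRange_zero n, List.map_map]
    apply List.map_congr_left
    intro jn hjn
    rw [List.mem_range] at hjn
    simp only [Function.comp, dl_dlV_eq]
    by_cases h0 : PySem.List.pyGetD core (jn : Int) 0 = 0
    · by_cases hv0 : dlV L i jn = 0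
      · rw [if_neg (fun h => h.2.1 hv0), if_neg (fun h => h.2.1 hv0)]
      · have hcell : 0 < dlV L i jn ∧ dlV L i jn ≤ k := by
          rcases hOk jn hjn with h | h
          · exact absurd h hv0
          · exact h
        refine if_congr ?_ rfl rfl
        constructor
        · rintro ⟨-, -, hd⟩
          refine ⟨h0, hv0, ?_⟩
          rcases hd with hd | hd
          · exact Or.inl ((hSmem (dlV L i jn) hcell.1 hcell.2).mpr hd)
          · exact Or.inr ((hclash jn hjn hv0 h0).mpr hd)
        · rintro ⟨-, -, hd⟩
          refine ⟨h0, hv0, ?_⟩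
          rcases hd with hd | hd
          · exact Or.inl ((hSmem (dlV L i jn) hcell.1 hcell.2).mp hd)
          · exact Or.inr ((hclash jn hjn hv0 h0).mp hd)
    · rw [if_neg (fun h => h0 h.1), if_neg (fun h => h0 h.1)]
  · -- length of the new core array
    rw [hA]
    simp
  · -- invariant preserved
    rw [hA]
    unfold dlColB
    dsimp only
    have hrange : ∀ x ∈ (dlCnts (dlV L i) core n.toNat).keys, 0 ≤ x ∧ x.toNat < bc.length := by
      intro x hx
      have := hkeysR x hx
      constructor
      · omega
      · rw [hbclen]; omega
    obtain ⟨hlen', hget'⟩ := dl_getD_foldl_setTrue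
      (fun c => (dlCnts (dlV L i) core n.toNat).getD c 0 ≥ 2)
      (dlCnts (dlV L i) core n.toNat).keys bc hrange
    refine ⟨hlen'.trans hbclen, ?_⟩
    intro c hc0 hck
    rw [hget' c hc0, hbcmem c hc0 hck, PySem.Set.mem_union, PySem.Set.mem_ofList]
    have haddmem : (c ∈ ((PySem.List.pyRange 0 n 1).filter (fun j =>
          decide (PySem.List.pyGetD core j 0 = 0) &&
          decide (PySem.List.pyGetD (PySem.List.pyGetD L j []) i 0 ≠ 0) &&
          (PySem.List.pyRange 0 n 1).any (fun h =>
            decide (¬ h = j) && decide (PySem.List.pyGetD core h 0 = 0) &&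
            decide (PySem.List.pyGetD (PySem.List.pyGetD L h []) i 0
                      = PySem.List.pyGetD (PySem.List.pyGetD L j []) i 0)))).map
          (fun j => PySem.List.pyGetD (PySem.List.pyGetD L j []) i 0))
        ↔ (c ∈ (dlCnts (dlV L i) core n.toNat).keys ∧
           (dlCnts (dlV L i) core n.toNat).getD c 0 ≥ 2) := by
      rw [PySem.List.pyRange_zero n, List.filter_map, List.map_map, List.mem_map]
      constructor
      · rintro ⟨jn, hjn, hvc⟩
        rw [List.mem_filter, List.mem_range] at hjn
        obtain ⟨hjn1, hjn2⟩ := hjn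
        simp only [Function.comp, Bool.and_eq_true, decide_eq_true_eq] at hjn2
        have hvjn : dlV L i jn ≠ 0 := hjn2.1.2
        have h0 : PySem.List.pyGetD core (jn : Int) 0 = 0 := hjn2.1.1
        have hcl := (hclash jn hjn1 hvjn h0).mp hjn2.2
        have hvc' : dlV L i jn = c := hvc
        constructor
        · rw [hkeys, PySem.Set.mem_ofList, List.mem_map]
          exact ⟨jn, (dl_mem_dlJsB (dlV L i) core n.toNat jn).mpr ⟨hjn1, hvjn, h0⟩, hvc'⟩
        · rw [← hvc']; exact hcl
      · rintro ⟨hckeys, hc2⟩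
        rw [hkeys, PySem.Set.mem_ofList, List.mem_map] at hckeys
        obtain ⟨jn, hjn, hvc⟩ := hckeys
        obtain ⟨hjn1, hjn2, hjn3⟩ := (dl_mem_dlJsB (dlV L i) core n.toNat jn).mp hjn
        refine ⟨jn, ?_, hvc⟩
        rw [List.mem_filter, List.mem_range]
        refine ⟨hjn1, ?_⟩
        simp only [Function.comp, Bool.and_eq_true, decide_eq_true_eq]
        exact ⟨⟨hjn3, hjn2⟩, (hclash jn hjn1 hjn2 hjn3).mpr (by rw [hvc]; exact hc2)⟩
    rw [haddmem]

lemma dl_fold (L : List (List Int)) (n k : Int) :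
    ∀ (is : List Int) (bc : List Bool) (core S : List Int),
      core.length = n.toNat → dlInv k bc S →
      (∀ i ∈ is, ∀ j : Nat, j < n.toNat → dlV L i j = 0 ∨ (0 < dlV L i j ∧ dlV L i j ≤ k)) →
      (is.foldl (dlColA L n) (bc, core)).2 = (is.foldl (dlColB L n) (S, core)).2 := by
  intro is
  induction is with
  | nil => intro bc core S _ _ _; rfl
  | cons i is ih =>
    intro bc core S hlen hInv hOk
    obtain ⟨h2, hlen', hInv'⟩ := dl_step L n k i bc core S hlen hInv
      (hOk i (List.mem_cons_self ..))
    rw [List.foldl_cons, List.foldl_cons]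
    have hB : dlColB L n (S, core) i = ((dlColB L n (S, core) i).1, (dlColA L n (bc, core) i).2) :=
      Prod.ext rfl h2.symm
    have hA : dlColA L n (bc, core) i = ((dlColA L n (bc, core) i).1, (dlColA L n (bc, core) i).2) :=
      Prod.ext rfl rfl
    rw [hB, hA]
    exact ih (dlColA L n (bc, core) i).1 (dlColA L n (bc, core) i).2 (dlColB L n (S, core) i).1
      hlen' hInv' (fun i' hi' => hOk i' (List.mem_cons_of_mem _ hi'))

lemma dl_inv_init (k : Int) : dlInv k (List.replicate (k + 1).toNat false) [] := by
  refine ⟨by simp, fun c hc0 hck => ?_⟩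
  constructor
  · intro h
    rw [PySem.List.pyGetD_of_nonneg _ false hc0, List.getD_eq_getElem?_getD,
      List.getElem?_replicate] at h
    split at h <;> simp_all
  · intro h; simp at h

theorem deadlock_situation_spec' : ∀ (n m k : Int) (L : List (List Int)),
    Pre_deadlock_situation n m k L →
    deadlock_situation n m k L = deadlock_situation_alt n m k L := by
  intro n m k L hPre
  rw [dl_portA_eq, dl_portB_eq]
  apply dl_fold L n k (PySem.List.pyRange 0 m 1) _ _ _ (by simp) (dl_inv_init k)
  intro i hi j hj
  rw [PySem.List.mem_pyRange_one] at hi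
  have h0m : 0 < m := by omega
  have h0n : 0 < n := by
    by_contra h
    have : n.toNat = 0 := by omega
    omega
  obtain ⟨hL, hrows⟩ := hPre h0m h0n
  have hjL : j < L.length := by
    have : (n.toNat : Int) ≤ (L.length : Int) := by
      rw [Int.toNat_of_nonneg (by omega)]; exact hL
    omega
  have hrow : PySem.List.pyGetD L (j : Int) [] = L[j] := by
    simp [List.getD_eq_getElem?_getD, List.getElem?_eq_getElem hjL]
  have hmem : L[j] ∈ L.take n.toNat := by
    have hjt : j < (L.take n.toNat).length := by
      rw [List.length_take]; omega
    have : (L.take n.toNat)[j] = L[j] := List.getElem_take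
    rw [← this]
    exact List.getElem_mem hjt
  obtain ⟨hrlen, hcells⟩ := hrows L[j] hmem
  have hilen : i.toNat < L[j].length := by omega
  have hcell : dlV L i j = L[j][i.toNat] := by
    unfold dlV
    rw [hrow, PySem.List.pyGetD_of_nonneg _ 0 hi.1, List.getD_eq_getElem?_getD,
      List.getElem?_eq_getElem hilen]
    rfl
  have hmemc : L[j][i.toNat] ∈ L[j].take m.toNat := by
    have hit : i.toNat < (L[j].take m.toNat).length := by
      rw [List.length_take]; omega
    have : (L[j].take m.toNat)[i.toNat] = L[j][i.toNat] := List.getElem_take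
    rw [← this]
    exact List.getElem_mem hit
  rw [hcell]
  exact hcells _ hmemc

-- ===== VERDICT (by name: the statement is the Claim_ definition above) =====
theorem deadlock_situation_spec : Claim_equal_deadlock_situation :=
  fun n m k L _ hPre => deadlock_situation_spec' n m k L hPre
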